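-- pv_equiv track=rewrite | github.com/aashiqmustak/whisp17 | edit_rag_processor.py | extract_job_description
-- ===== SOURCE A (Python) =====
-- def extract_job_description(original_message: str) -> str:
--     """
--     Extract job description from the original Slack message.
--
--     Args:
--         original_message: Full Slack message with user mentions and text
--
--     Returns:
--         Clean job description text
--     """
--     # Remove user mentions and extra text
--     lines = original_message.split('\n')
--     job_desc_lines = []
--
--     # Skip the first line if it contains user mention
--     start_idx = 0
--     if lines and lines[0].startswith('Hey @'):
--         start_idx = 1
--
--     # Find the actual job description content
--     for i in range(start_idx, len(lines)):
--         line = lines[i].strip()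
--         if line and not line.startswith('Does this look okay?'):
--             job_desc_lines.append(line)
--         elif line.startswith('Does this look okay?'):
--             break
--
--     return '\n'.join(job_desc_lines).strip()
-- ===== SOURCE B (Python) =====
-- def _build(lines):
--     # Recursively build the joined description string directly (no intermediate list):
--     # stop on the sentinel line, skip blank lines, glue kept lines with '\n' back-to-front.
--     if not lines:
--         return ''
--     s = lines[0].strip()
--     if s.startswith('Does this look okay?'):
--         return ''
--     rest = _build(lines[1:])
--     if not s:
--         return rest
--     return s + '\n' + rest if rest else s
--
--
-- def extract_job_description(original_message: str) -> str:
--     lines = original_message.split('\n')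
--     if lines and lines[0].startswith('Hey @'):
--         lines = lines[1:]
--     return _build(lines).strip()
-- ===== Notes on version B (the rewrite author's own statement) =====
-- stated objective: alternative
-- what changed: Replaces A's iterative accumulate-lines-then-join loop by a recursive function that constructs the joined description string directly back-to-front, with no intermediate list of kept lines.
import Mathlib
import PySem

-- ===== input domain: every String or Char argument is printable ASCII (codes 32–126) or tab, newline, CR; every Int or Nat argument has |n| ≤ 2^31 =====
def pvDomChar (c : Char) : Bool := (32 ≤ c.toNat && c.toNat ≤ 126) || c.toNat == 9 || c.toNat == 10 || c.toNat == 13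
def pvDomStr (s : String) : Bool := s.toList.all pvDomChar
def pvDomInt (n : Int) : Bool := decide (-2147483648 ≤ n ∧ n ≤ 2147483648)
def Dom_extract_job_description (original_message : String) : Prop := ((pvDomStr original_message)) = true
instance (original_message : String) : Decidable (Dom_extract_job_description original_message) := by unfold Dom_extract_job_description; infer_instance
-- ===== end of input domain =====

-- B replaces A's accumulate-lines-then-join loop by a recursive function building the joined string directly back-to-front (alternative decomposition, same cost).

-- ===== PORT A =====
-- the for-loop with break, as structural recursion over the remaining lines with the accumulator
def pvLoopA : List String → List String → List String
  | [], acc => acc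
  | l :: ls, acc =>
    let line := PySem.Str.strip l
    if line ≠ "" ∧ ¬ (PySem.Str.startswith line "Does this look okay?") then
      pvLoopA ls (acc ++ [line])
    else if PySem.Str.startswith line "Does this look okay?" then
      acc
    else
      pvLoopA ls acc

def extract_job_description (original_message : String) : String :=
  let lines := (PySem.Str.split? original_message "\n").getD []   -- sep = "\n" ≠ "", exact
  let start_idx : Nat :=
    match lines with
    | l0 :: _ => if PySem.Str.startswith l0 "Hey @" then 1 else 0
    | [] => 0
  let job_desc_lines := pvLoopA (lines.drop start_idx) []
  PySem.Str.strip (PySem.Str.join "\n" job_desc_lines)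

-- ===== PORT B =====
-- _build: recursion on the list of lines, constructing the joined string directly
def pvBuild : List String → String
  | [] => ""
  | l :: ls =>
    let s := PySem.Str.strip l
    if PySem.Str.startswith s "Does this look okay?" then ""
    else
      let rest := pvBuild ls
      if s = "" then rest
      else if rest = "" then s
      else String.ofList (s.toList ++ '\n' :: rest.toList)   -- s + '\n' + rest, exact concatenation

def extract_job_description_alt (original_message : String) : String :=
  let lines := (PySem.Str.split? original_message "\n").getD []   -- sep = "\n" ≠ "", exact
  let lines' :=
    match lines with
    | l0 :: rest => if PySem.Str.startswith l0 "Hey @" then rest else lines   -- lines[1:] on a nonempty list = tail, exact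
    | [] => lines
  PySem.Str.strip (pvBuild lines')

-- ===== PRECONDITION & SPEC =====
def Spec_extract_job_description (original_message : String) (out : String) : Prop := out = extract_job_description_alt original_message
instance (original_message : String) (out : String) : Decidable (Spec_extract_job_description original_message out) := by unfold Spec_extract_job_description; infer_instance

-- ===== CLAIM (what is proved, stated in full; the proofs are below) =====
def Claim_equal_extract_job_description : Prop := ∀ (original_message : String), Dom_extract_job_description original_message → Spec_extract_job_description original_message (extract_job_description original_message)

-- ===== LEMMAS AND PROOFS =====

theorem pvLoopA_acc (ls : List String) (acc : List String) :
    pvLoopA ls acc = acc ++ pvLoopA ls [] := by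
  induction ls generalizing acc with
  | nil => simp [pvLoopA]
  | cons l ls ih =>
    simp only [pvLoopA]
    split_ifs with h1 h2
    · rw [ih (acc ++ [_]), ih ([] ++ [_])]; simp
    · simp
    · exact ih acc

theorem pvLoopA_ne_nil (ls : List String) : ∀ x ∈ pvLoopA ls [], x ≠ "" := by
  induction ls with
  | nil => simp [pvLoopA]
  | cons l ls ih =>
    simp only [pvLoopA]
    split_ifs with h1 h2
    · rw [pvLoopA_acc]
      intro x hx
      simp only [List.nil_append, List.mem_append, List.mem_singleton] at hx
      rcases hx with rfl | h
      · exact h1.1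
      · exact ih x h
    · simp
    · exact ih

theorem pvBuild_eq (ls : List String) :
    pvBuild ls = PySem.Str.join "\n" (pvLoopA ls []) := by
  induction ls with
  | nil => simp [pvBuild, pvLoopA, PySem.Str.join, PySem.Chars.join, List.intercalate]
  | cons l ls ih =>
    simp only [pvBuild, pvLoopA]
    by_cases hp : PySem.Str.startswith (PySem.Str.strip l) "Does this look okay?" = true
    · rw [if_pos hp, if_neg (fun h => h.2 hp), if_pos hp]
      simp [PySem.Str.join, PySem.Chars.join, List.intercalate]
    · rw [if_neg hp]
      by_cases he : PySem.Str.strip l = ""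
      · rw [if_pos he, if_neg (fun h => h.1 he), if_neg hp]
        exact ih
      · have hcond : PySem.Str.strip l ≠ "" ∧ ¬ PySem.Str.startswith (PySem.Str.strip l) "Does this look okay?" = true := ⟨he, hp⟩
        rw [if_neg he, if_pos hcond, pvLoopA_acc, ih]
        rcases hq : pvLoopA ls [] with _ | ⟨u, us⟩
        · simp [PySem.Str.join, PySem.Chars.join, List.intercalate, PySem.Str.strip]
        · have hu : u ≠ "" := pvLoopA_ne_nil ls u (by rw [hq]; exact List.mem_cons_self ..)
          have hul : u.toList ≠ [] := fun h => hu (by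
            have := congrArg String.ofList h
            simpa using this)
          have hjoin_ne : PySem.Str.join "\n" (u :: us) ≠ "" := by
            intro h
            have h2 := congrArg String.toList h
            rcases us with _ | ⟨v, vs⟩
            · exact hul (by simpa [PySem.Str.join, PySem.Chars.join, List.intercalate] using h2)
            · simp [PySem.Str.join, PySem.Chars.join, List.intercalate] at h2
          rw [if_neg hjoin_ne]
          rcases us with _ | ⟨v, vs⟩ <;>
            simp [PySem.Str.join, PySem.Chars.join, List.intercalate, List.intersperse, PySem.Str.strip]

-- ===== VERDICT (by name: the statement is the Claim_ definition above) =====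
theorem extract_job_description_spec : Claim_equal_extract_job_description := by
  intro m _
  unfold Spec_extract_job_description extract_job_description extract_job_description_alt
  simp only [pvBuild_eq]
  rcases (PySem.Str.split? m "\n").getD [] with _ | ⟨l0, rest⟩
  · rfl
  · dsimp only
    by_cases h : PySem.Str.startswith l0 "Hey @" = true
    · rw [if_pos h, if_pos h]; rfl
    · rw [if_neg h, if_neg h]; rfl
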